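-- pv_equiv track=rewrite | github.com/ctmartinez1992/advent-of-code-2023 | days/day1_2.py | process
-- ===== SOURCE A (Python) =====
-- digit_strings = ["one", "two", "three", "four", "five", "six", "seven", "eight", "nine"]
--
-- digit_ints = {
--     "one": "1",
--     "two": "2",
--     "three": "3",
--     "four": "4",
--     "five": "5",
--     "six": "6",
--     "seven": "7",
--     "eight": "8",
--     "nine": "9",
-- }
--
-- def process(i, line):
--     found = {}
--     for i, char in enumerate(line[::1]):
--         if char.isdigit():
--             found[i] = char
--             break
--     for i, char in enumerate(line[::-1]):
--         if char.isdigit():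
--             found[len(line) - 1 - i] = char
--             break
--     for str in digit_strings:
--         j = line.find(str)
--         if j > -1:
--             found[j] = digit_ints[str]
--         j = line.rfind(str)
--         if j > -1:
--             found[j] = digit_ints[str]
--
--     return found[min(found, key=int)], found[max(found, key=int)]
-- ===== SOURCE B (Python) =====
-- def process(i, line):
--     words = {
--         "one": "1", "two": "2", "three": "3", "four": "4", "five": "5",
--         "six": "6", "seven": "7", "eight": "8", "nine": "9",
--     }
--     vals = []
--     for p in range(len(line)):
--         rest = line[p:]
--         if rest[0].isdigit():
--             vals.append(rest[0])
--         else: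
--             for w, v in words.items():
--                 if rest.startswith(w):
--                     vals.append(v)
--                     break
--     return vals[0], vals[-1]
-- ===== Notes on version B (the rewrite author's own statement) =====
-- stated objective: alternative
-- what changed: B replaces A's four-phase dict construction (first/last digit scans plus find/rfind of each spelled word, then min/max over the dict keys) by a single left-to-right scan that resolves the digit-or-word match at each position and keeps the first and last matched value.
import Mathlib
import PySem

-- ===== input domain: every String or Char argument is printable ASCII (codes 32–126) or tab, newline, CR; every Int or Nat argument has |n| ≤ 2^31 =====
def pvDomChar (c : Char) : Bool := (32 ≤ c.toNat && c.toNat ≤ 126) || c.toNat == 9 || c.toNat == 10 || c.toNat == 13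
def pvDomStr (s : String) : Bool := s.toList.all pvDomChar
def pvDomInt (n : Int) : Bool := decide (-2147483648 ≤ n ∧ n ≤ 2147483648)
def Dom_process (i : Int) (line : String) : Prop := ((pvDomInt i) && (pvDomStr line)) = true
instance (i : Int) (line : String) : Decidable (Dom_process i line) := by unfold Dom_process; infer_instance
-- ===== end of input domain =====

-- B replaces A's four searches + position-keyed dict read back via min/max by a single
-- left-to-right scan keeping the first and last digit-or-spelled-digit match (return values only;
-- neither version mutates its arguments).

-- ===== PORT A =====
def pvDigitStrings : List String := ["one", "two", "three", "four", "five", "six", "seven", "eight", "nine"]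

def pvDigitInts : PySem.Dict String String :=
  PySem.Dict.ofList [("one", "1"), ("two", "2"), ("three", "3"), ("four", "4"), ("five", "5"),
                     ("six", "6"), ("seven", "7"), ("eight", "8"), ("nine", "9")]

-- 'for i, char in enumerate(line[::1]): if char.isdigit(): found[i] = char; break'
def pvLoopFirst : List Char → Int → PySem.Dict Int String → PySem.Dict Int String
  | [], _, d => d
  | c :: cs, i, d =>
      if PySem.Chars.isdigit c then d.insert i (String.ofList [c]) else pvLoopFirst cs (i + 1) d

-- 'for i, char in enumerate(line[::-1]): if char.isdigit(): found[len(line) - 1 - i] = char; break'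
def pvLoopLast : List Char → Int → Int → PySem.Dict Int String → PySem.Dict Int String
  | [], _, _, d => d
  | c :: cs, i, n, d =>
      if PySem.Chars.isdigit c then d.insert (n - 1 - i) (String.ofList [c]) else pvLoopLast cs (i + 1) n d

def process (i : Int) (line : String) : String × String :=
  let s := line.toList
  let found : PySem.Dict Int String := PySem.Dict.empty
  let found := pvLoopFirst s 0 found
  let found := pvLoopLast s.reverse 0 (s.length : Int) found
  let found := pvDigitStrings.foldl (fun d w =>
      let v := (pvDigitInts.get? w).getD ""
      let j := PySem.Chars.find s w.toList
      let d := if j > -1 then d.insert j v else d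
      let j2 := PySem.Chars.rfind s w.toList
      if j2 > -1 then d.insert j2 v else d) found
  (match PySem.List.min? found.keys (fun k => k) with
   | some k => (found.get? k).getD ""
   | none => "",
   match PySem.List.max? found.keys (fun k => k) with
   | some k => (found.get? k).getD ""
   | none => "")

-- ===== PORT B =====
def pvWords : List (String × String) :=
  [("one", "1"), ("two", "2"), ("three", "3"), ("four", "4"), ("five", "5"),
   ("six", "6"), ("seven", "7"), ("eight", "8"), ("nine", "9")]

-- the inner 'for w, v in words.items(): if rest.startswith(w): vals.append(v); break'
def pvMatchWord : List (String × String) → List Char → Option String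
  | [], _ => none
  | (w, v) :: ws, rest =>
      if PySem.Chars.startswith rest w.toList then some v else pvMatchWord ws rest

def process_alt (i : Int) (line : String) : String × String :=
  let s := line.toList
  let vals : List String := (List.range s.length).foldl (fun acc p =>
      match s.drop p with
      | [] => acc
      | c :: _ =>
          if PySem.Chars.isdigit c then acc ++ [String.ofList [c]]
          else match pvMatchWord pvWords (s.drop p) with
               | some v => acc ++ [v]
               | none => acc) []
  ((vals[0]?).getD "", (vals.getLast?).getD "")

-- ===== PRECONDITION & SPEC =====
-- Pre_ excludes exactly the lines with no digit character and no spelled digit word: there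
-- A raises ValueError (min of an empty dict) and B raises IndexError (vals[0]).
def Pre_process (i : Int) (line : String) : Prop :=
  (line.toList.any PySem.Chars.isdigit
    || pvDigitStrings.any (fun w => PySem.Chars.isIn w.toList line.toList)) = true
instance (i : Int) (line : String) : Decidable (Pre_process i line) := by unfold Pre_process; infer_instance

def pvWitness_process : Int × String := (0, "xtwone3x")

def Spec_process (i : Int) (line : String) (out : String × String) : Prop := out = process_alt i line
instance (i : Int) (line : String) (out : String × String) : Decidable (Spec_process i line out) := by unfold Spec_process; infer_instance

-- ===== CLAIM (what is proved, stated in full; the proofs are below) =====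
def Claim_equal_process : Prop :=
  ∀ (i : Int) (line : String), Dom_process i line → Pre_process i line → Spec_process i line (process i line)

-- ===== LEMMAS AND PROOFS =====





def pvMAt (s : List Char) (p : Nat) : Option String :=
  if h : p < s.length then
    if PySem.Chars.isdigit s[p] then some (String.ofList [s[p]]) else pvMatchWord pvWords (s.drop p)
  else none

-- ## generic
theorem pvHead?_filterMap {α β : Type} (l : List α) (f : α → Option β) :
    (l.filterMap f).head? = (l.find? (fun x => (f x).isSome)).bind f := by
  induction l with
  | nil => rfl
  | cons x t ih =>
      cases hx : f x with
      | none => simpa [List.filterMap_cons, List.find?_cons, hx] using ih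
      | some v => simp [List.filterMap_cons, List.find?_cons, hx]

theorem pvInfix_of_prefix_drop {a s : List Char} {p : Nat} (h : a <+: s.drop p) : a <:+: s := by
  obtain ⟨t, ht⟩ := h
  exact ⟨s.take p, t, by rw [List.append_assoc, ht, List.take_append_drop]⟩

-- ## words
theorem pvWords_unique {rest : List Char} {a b : String × String}
    (ha : a ∈ pvWords) (hb : b ∈ pvWords)
    (hpa : a.1.toList <+: rest) (hpb : b.1.toList <+: rest) : a = b := by
  have key : ∀ x ∈ pvWords, ∀ y ∈ pvWords, x.1.toList <+: y.1.toList → x = y := by decide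
  rcases List.prefix_or_prefix_of_prefix hpa hpb with h | h
  · exact key a ha b hb h
  · exact (key b hb a ha h).symm

theorem pvMatchWord_some_of' {ws : List (String × String)} {rest : List Char} {wv : String × String}
    (hu : ∀ x ∈ ws, ∀ y ∈ ws, x.1.toList <+: rest → y.1.toList <+: rest → x = y)
    (hw : wv ∈ ws) (hp : wv.1.toList <+: rest) :
    pvMatchWord ws rest = some wv.2 := by
  induction ws with
  | nil => cases hw
  | cons h t ih =>
      obtain ⟨w, v⟩ := h
      rcases List.mem_cons.mp hw with rfl | hmem
      · simp [pvMatchWord, (PySem.Chars.startswith_iff _ _).mpr hp]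
      · by_cases hs : PySem.Chars.startswith rest w.toList
        · have := hu (w, v) (by simp) wv (List.mem_cons_of_mem _ hmem)
            ((PySem.Chars.startswith_iff _ _).mp hs) hp
          simp [pvMatchWord, hs, ← this]
        · simpa [pvMatchWord, hs] using
            ih (fun x hx y hy => hu x (List.mem_cons_of_mem _ hx) y (List.mem_cons_of_mem _ hy)) hmem

theorem pvMatchWord_some_of {rest : List Char} {wv : String × String}
    (hw : wv ∈ pvWords) (hp : wv.1.toList <+: rest) :
    pvMatchWord pvWords rest = some wv.2 :=
  pvMatchWord_some_of' (fun _ hx _ hy => pvWords_unique hx hy) hw hp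

theorem pvMatchWord_exists {ws : List (String × String)} {rest : List Char} {v : String}
    (h : pvMatchWord ws rest = some v) :
    ∃ wv ∈ ws, wv.2 = v ∧ wv.1.toList <+: rest := by
  induction ws with
  | nil => simp [pvMatchWord] at h
  | cons hd t ih =>
      obtain ⟨w, u⟩ := hd
      by_cases hs : PySem.Chars.startswith rest w.toList
      · refine ⟨(w, u), by simp, ?_, (PySem.Chars.startswith_iff _ _).mp hs⟩
        simpa [pvMatchWord, hs] using h
      · obtain ⟨wv, h1, h2, h3⟩ := ih (by simpa [pvMatchWord, hs] using h)
        exact ⟨wv, List.mem_cons_of_mem _ h1, h2, h3⟩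

-- ## pvMAt facts
theorem pvMAt_isSome_of_lt {s : List Char} {p : Nat} (h : (pvMAt s p).isSome) : p < s.length := by
  by_contra hn
  simp [pvMAt, hn] at h

theorem pvMAt_of_digit {s : List Char} {p : Nat} (h : p < s.length)
    (hd : PySem.Chars.isdigit s[p]) : pvMAt s p = some (String.ofList [s[p]]) := by
  simp [pvMAt, h, hd]

theorem pvMAt_of_word {s : List Char} {p : Nat} {wv : String × String}
    (hw : wv ∈ pvWords) (hp : wv.1.toList <+: s.drop p) : pvMAt s p = some wv.2 := by
  have hshape : ∀ x ∈ pvWords, x.1.toList ≠ [] ∧ PySem.Chars.isdigit x.1.toList.head! = false := by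
    decide
  obtain ⟨hne, hd0⟩ := hshape wv hw
  obtain ⟨r, hr⟩ := hp
  have hdne : s.drop p ≠ [] := by
    intro h0; rw [h0] at hr; exact hne (List.append_eq_nil_iff.mp hr).1
  have hlt : p < s.length := by
    by_contra hn
    exact hdne (List.drop_eq_nil_of_le (by omega))
  have hgd : s.drop p = s[p] :: s.drop (p + 1) := List.drop_eq_getElem_cons hlt
  have hcd : PySem.Chars.isdigit s[p] = false := by
    cases hct : wv.1.toList with
    | nil => exact absurd hct hne
    | cons c t =>
        have : c = s[p] := by
          rw [hct] at hr
          rw [hgd] at hr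
          exact (List.cons.injEq _ _ _ _ ▸ hr).1
        rw [hct] at hd0; simp at hd0; rwa [this] at hd0
  rw [pvMAt, dif_pos hlt, if_neg (by simp [hcd])]
  exact pvMatchWord_some_of hw ⟨r, hr⟩

theorem pvMAt_some_cases {s : List Char} {p : Nat} {v : String} (h : pvMAt s p = some v) :
    ∃ hlt : p < s.length,
      (PySem.Chars.isdigit s[p] ∧ v = String.ofList [s[p]]) ∨
      (∃ wv ∈ pvWords, wv.2 = v ∧ wv.1.toList <+: s.drop p) := by
  have hlt : p < s.length := pvMAt_isSome_of_lt (by simp [h])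
  refine ⟨hlt, ?_⟩
  rw [pvMAt, dif_pos hlt] at h
  by_cases hd : PySem.Chars.isdigit s[p]
  · left
    rw [if_pos hd] at h
    exact ⟨hd, (Option.some.injEq _ _ ▸ h).symm⟩
  · right
    rw [if_neg hd] at h
    obtain ⟨wv, h1, h2, h3⟩ := pvMatchWord_exists h
    exact ⟨wv, h1, h2, h3⟩

-- ports (copy for scratch)


def pvStep (s : List Char) (d : PySem.Dict Int String) (w : String) : PySem.Dict Int String :=
  let v := (pvDigitInts.get? w).getD ""
  let j := PySem.Chars.find s w.toList
  let d := if j > -1 then d.insert j v else d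
  let j2 := PySem.Chars.rfind s w.toList
  if j2 > -1 then d.insert j2 v else d

-- ## dict invariant
def pvInv (s : List Char) (d : PySem.Dict Int String) : Prop :=
  ∀ kv ∈ d.items, ∃ p : Nat, kv.1 = (p : Int) ∧ pvMAt s p = some kv.2

theorem pvInv_insert {s : List Char} {d : PySem.Dict Int String} {k : Int} {v : String}
    (hd : pvInv s d) (hv : ∃ p : Nat, k = (p : Int) ∧ pvMAt s p = some v) :
    pvInv s (d.insert k v) := by
  intro kv hkv
  rcases (PySem.Dict.mem_items_insert _ _ _ _).mp hkv with rfl | ⟨hmem, _⟩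
  · exact hv
  · exact hd kv hmem

theorem pvKeys_insert_mono {d : PySem.Dict Int String} {k k' : Int} {v : String}
    (h : k ∈ d.keys) : k ∈ (d.insert k' v).keys :=
  (PySem.Dict.mem_keys_insert _ _ _ _).mpr (Or.inr h)

-- ## loop 1
theorem pvLoopFirst_inv {s : List Char} : ∀ (cs : List Char) (i : Int) (d : PySem.Dict Int String),
    pvInv s d →
    (∀ (j : Nat) (hj : j < cs.length), PySem.Chars.isdigit cs[j] = true →
        ∃ p : Nat, i + (j : Int) = (p : Int) ∧ pvMAt s p = some (String.ofList [cs[j]])) →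
    pvInv s (pvLoopFirst cs i d) := by
  intro cs
  induction cs with
  | nil => intro i d hd _; exact hd
  | cons c t ih =>
      intro i d hd hj
      by_cases hc : PySem.Chars.isdigit c
      · rw [pvLoopFirst, if_pos hc]
        exact pvInv_insert hd (by simpa using hj 0 (by simp) (by simpa using hc))
      · rw [pvLoopFirst, if_neg hc]
        refine ih (i + 1) d hd ?_
        intro j hjlt hjd
        obtain ⟨p, hp1, hp2⟩ := hj (j + 1) (by simpa using hjlt) (by simpa using hjd)
        exact ⟨p, by push_cast at hp1 ⊢; linarith, by simpa using hp2⟩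

theorem pvLoopFirst_mem : ∀ (cs : List Char) (i : Int) (d : PySem.Dict Int String) (j : Nat),
    cs.findIdx? PySem.Chars.isdigit = some j → (i + (j : Int)) ∈ (pvLoopFirst cs i d).keys := by
  intro cs
  induction cs with
  | nil => intro i d j h; simp at h
  | cons c t ih =>
      intro i d j h
      rw [List.findIdx?_cons] at h
      by_cases hc : PySem.Chars.isdigit c
      · rw [if_pos hc] at h
        rw [pvLoopFirst, if_pos hc]
        have : j = 0 := by simpa using h.symm
        subst this
        simpa using (PySem.Dict.mem_keys_insert _ _ _ _).mpr (Or.inl rfl)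
      · rw [if_neg hc] at h
        rw [pvLoopFirst, if_neg hc]
        obtain ⟨j', hj', rfl⟩ := Option.map_eq_some_iff.mp h
        have := ih (i + 1) d j' hj'
        have e : i + ((j' + 1 : Nat) : Int) = i + 1 + (j' : Int) := by push_cast; ring
        rw [e]; exact this

-- ## loop 2
theorem pvLoopLast_inv {s : List Char} {n : Int} : ∀ (cs : List Char) (i : Int) (d : PySem.Dict Int String),
    pvInv s d →
    (∀ (j : Nat) (hj : j < cs.length), PySem.Chars.isdigit cs[j] = true →
        ∃ p : Nat, n - 1 - (i + (j : Int)) = (p : Int) ∧ pvMAt s p = some (String.ofList [cs[j]])) →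
    pvInv s (pvLoopLast cs i n d) := by
  intro cs
  induction cs with
  | nil => intro i d hd _; exact hd
  | cons c t ih =>
      intro i d hd hj
      by_cases hc : PySem.Chars.isdigit c
      · rw [pvLoopLast, if_pos hc]
        refine pvInv_insert hd ?_
        obtain ⟨p, hp1, hp2⟩ := hj 0 (by simp) (by simpa using hc)
        exact ⟨p, by push_cast at hp1 ⊢; linarith, by simpa using hp2⟩
      · rw [pvLoopLast, if_neg hc]
        refine ih (i + 1) d hd ?_
        intro j hjlt hjd
        obtain ⟨p, hp1, hp2⟩ := hj (j + 1) (by simpa using hjlt) (by simpa using hjd)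
        exact ⟨p, by push_cast at hp1 ⊢; linarith, by simpa using hp2⟩

theorem pvLoopLast_keys_mono {k n : Int} : ∀ (cs : List Char) (i : Int) (d : PySem.Dict Int String),
    k ∈ d.keys → k ∈ (pvLoopLast cs i n d).keys := by
  intro cs
  induction cs with
  | nil => intro i d h; exact h
  | cons c t ih =>
      intro i d h
      by_cases hc : PySem.Chars.isdigit c
      · rw [pvLoopLast, if_pos hc]; exact pvKeys_insert_mono h
      · rw [pvLoopLast, if_neg hc]; exact ih _ _ h

theorem pvLoopLast_mem {n : Int} : ∀ (cs : List Char) (i : Int) (d : PySem.Dict Int String) (j : Nat),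
    cs.findIdx? PySem.Chars.isdigit = some j → (n - 1 - (i + (j : Int))) ∈ (pvLoopLast cs i n d).keys := by
  intro cs
  induction cs with
  | nil => intro i d j h; simp at h
  | cons c t ih =>
      intro i d j h
      rw [List.findIdx?_cons] at h
      by_cases hc : PySem.Chars.isdigit c
      · rw [if_pos hc] at h
        rw [pvLoopLast, if_pos hc]
        have : j = 0 := by simpa using h.symm
        subst this
        simpa using (PySem.Dict.mem_keys_insert _ _ (n - 1 - i) _).mpr (Or.inl rfl)
      · rw [if_neg hc] at h
        rw [pvLoopLast, if_neg hc]
        obtain ⟨j', hj', rfl⟩ := Option.map_eq_some_iff.mp h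
        have := ih (i + 1) d j' hj'
        have e : n - 1 - (i + ((j' + 1 : Nat) : Int)) = n - 1 - (i + 1 + (j' : Int)) := by push_cast; ring
        rw [e]; exact this

-- ## rfind spec
theorem pvRfind_go_prefix {s sub : List Char} : ∀ (k : Nat),
    PySem.Chars.rfind.go s sub k ≠ -1 →
    0 ≤ PySem.Chars.rfind.go s sub k ∧ sub <+: s.drop (PySem.Chars.rfind.go s sub k).toNat := by
  intro k
  induction k with
  | zero =>
      intro h
      by_cases hp : sub.isPrefixOf s
      · simp [PySem.Chars.rfind.go, hp]
        exact List.isPrefixOf_iff_prefix.mp hp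
      · simp [PySem.Chars.rfind.go, hp] at h
  | succ k ih =>
      intro h
      by_cases hp : sub.isPrefixOf (s.drop (k + 1))
      · simp [PySem.Chars.rfind.go, hp]
        exact ⟨by positivity, List.isPrefixOf_iff_prefix.mp hp⟩
      · rw [PySem.Chars.rfind.go] at h ⊢
        simp only [hp, Bool.false_eq_true, if_false] at h ⊢
        exact ih h

theorem pvRfind_go_ge {s sub : List Char} : ∀ (k i : Nat), i ≤ k → sub <+: s.drop i →
    (i : Int) ≤ PySem.Chars.rfind.go s sub k := by
  intro k
  induction k with
  | zero =>
      intro i hik hp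
      interval_cases i
      simp at hp
      simp [PySem.Chars.rfind.go, List.isPrefixOf_iff_prefix.mpr hp]
  | succ k ih =>
      intro i hik hp
      by_cases hq : sub.isPrefixOf (s.drop (k + 1))
      · rw [PySem.Chars.rfind.go]
        simp only [hq, if_true]
        exact_mod_cast Nat.cast_le.mpr hik
      · rw [PySem.Chars.rfind.go]
        simp only [hq, Bool.false_eq_true, if_false]
        rcases Nat.lt_or_ge i (k + 1) with hlt | hge
        · exact ih i (by omega) hp
        · have : i = k + 1 := by omega
          subst this
          exact absurd (List.isPrefixOf_iff_prefix.mpr hp) (by simpa using hq)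

-- ## step 3 lemmas
theorem pvWords_proj : ∀ x ∈ pvWords, x.1 ∈ pvDigitStrings ∧ (pvDigitInts.get? x.1).getD "" = x.2 := by
  decide

theorem pvDigit_mem_words : ∀ w ∈ pvDigitStrings, (w, (pvDigitInts.get? w).getD "") ∈ pvWords := by
  decide

theorem pvRfind_eq_go (s sub : List Char) :
    PySem.Chars.rfind s sub = PySem.Chars.rfind.go s sub s.length := rfl

theorem pvRfind_prefix {s sub : List Char} (h : PySem.Chars.rfind s sub ≠ -1) :
    0 ≤ PySem.Chars.rfind s sub ∧ sub <+: s.drop (PySem.Chars.rfind s sub).toNat :=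
  pvRfind_go_prefix s.length h

theorem pvStep_inv {s : List Char} {d : PySem.Dict Int String} {w : String}
    (hd : pvInv s d) (hw : w ∈ pvDigitStrings) : pvInv s (pvStep s d w) := by
  have hwv := pvDigit_mem_words w hw
  simp only [pvStep]
  have step1 : ∀ (d' : PySem.Dict Int String) (j : Int), pvInv s d' → 0 ≤ j →
      w.toList <+: s.drop j.toNat → pvInv s (d'.insert j ((pvDigitInts.get? w).getD "")) := by
    intro d' j hd' hj hp
    exact pvInv_insert hd' ⟨j.toNat, (Int.toNat_of_nonneg hj).symm, pvMAt_of_word hwv hp⟩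
  by_cases h1 : PySem.Chars.find s w.toList > -1
  · rw [if_pos h1]
    obtain ⟨hpre, -⟩ := PySem.Chars.find_spec (s := s) (sub := w.toList) (by omega)
    have hd1 := step1 _ _ hd (by omega) hpre
    by_cases h2 : PySem.Chars.rfind s w.toList > -1
    · rw [if_pos h2]
      obtain ⟨hge, hpre2⟩ := pvRfind_prefix (s := s) (sub := w.toList) (by omega)
      exact step1 _ _ hd1 hge hpre2
    · rw [if_neg h2]; exact hd1
  · rw [if_neg h1]
    by_cases h2 : PySem.Chars.rfind s w.toList > -1
    · rw [if_pos h2]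
      obtain ⟨hge, hpre2⟩ := pvRfind_prefix (s := s) (sub := w.toList) (by omega)
      exact step1 _ _ hd hge hpre2
    · rw [if_neg h2]; exact hd

theorem pvStep_keys_mono {s : List Char} {d : PySem.Dict Int String} {w : String} {k : Int}
    (h : k ∈ d.keys) : k ∈ (pvStep s d w).keys := by
  simp only [pvStep]
  split_ifs <;> first
    | exact pvKeys_insert_mono (pvKeys_insert_mono h)
    | exact pvKeys_insert_mono h
    | exact h

theorem pvFoldl_inv {s : List Char} : ∀ (l : List String) (d : PySem.Dict Int String),
    (∀ w ∈ l, w ∈ pvDigitStrings) → pvInv s d → pvInv s (l.foldl (pvStep s) d) := by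
  intro l
  induction l with
  | nil => intro d _ hd; exact hd
  | cons w t ih =>
      intro d hl hd
      rw [List.foldl_cons]
      exact ih _ (fun x hx => hl x (List.mem_cons_of_mem _ hx)) (pvStep_inv hd (hl w (by simp)))

theorem pvFoldl_keys_mono {s : List Char} {k : Int} : ∀ (l : List String) (d : PySem.Dict Int String),
    k ∈ d.keys → k ∈ (l.foldl (pvStep s) d).keys := by
  intro l
  induction l with
  | nil => intro d h; exact h
  | cons w t ih => intro d h; exact ih _ (pvStep_keys_mono h)

theorem pvFoldl_mem {s : List Char} {k : Int} {w0 : String} : ∀ (l : List String),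
    w0 ∈ l → (∀ d : PySem.Dict Int String, k ∈ (pvStep s d w0).keys) →
    ∀ d : PySem.Dict Int String, k ∈ (l.foldl (pvStep s) d).keys := by
  intro l
  induction l with
  | nil => intro h; cases h
  | cons w t ih =>
      intro hmem hstep d
      rcases List.mem_cons.mp hmem with rfl | hmem'
      · exact pvFoldl_keys_mono t _ (hstep d)
      · exact ih hmem' hstep _

theorem pvStep_mem_find {s : List Char} {w : String} {p : Nat}
    (h : PySem.Chars.find s w.toList = (p : Int)) :
    ∀ d : PySem.Dict Int String, (p : Int) ∈ (pvStep s d w).keys := by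
  intro d
  simp only [pvStep]
  have h1 : PySem.Chars.find s w.toList > -1 := by rw [h]; omega
  rw [if_pos h1]
  split_ifs with h2
  · exact pvKeys_insert_mono ((PySem.Dict.mem_keys_insert _ _ _ _).mpr (Or.inl h.symm))
  · exact (PySem.Dict.mem_keys_insert _ _ _ _).mpr (Or.inl h.symm)

theorem pvStep_mem_rfind {s : List Char} {w : String} {p : Nat}
    (h : PySem.Chars.rfind s w.toList = (p : Int)) :
    ∀ d : PySem.Dict Int String, (p : Int) ∈ (pvStep s d w).keys := by
  intro d
  simp only [pvStep]
  have h2 : PySem.Chars.rfind s w.toList > -1 := by rw [h]; omega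
  rw [if_pos h2]
  exact (PySem.Dict.mem_keys_insert _ _ _ _).mpr (Or.inl h.symm)

-- ## find / rfind hit exactly the extremal match positions
theorem pvFind_eq_of {s : List Char} {wv : String × String} {p : Nat}
    (hw : wv ∈ pvWords) (hp : wv.1.toList <+: s.drop p)
    (hmin : ∀ q : Nat, (pvMAt s q).isSome → p ≤ q) :
    PySem.Chars.find s wv.1.toList = (p : Int) := by
  have h0 : 0 ≤ PySem.Chars.find s wv.1.toList :=
    (PySem.Chars.find_nonneg_iff _ _).mpr (pvInfix_of_prefix_drop hp)
  obtain ⟨hpre, hlt⟩ := PySem.Chars.find_spec h0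
  have hle : (PySem.Chars.find s wv.1.toList).toNat ≤ p := by
    by_contra hgt
    exact hlt p (by omega) hp
  have hge : p ≤ (PySem.Chars.find s wv.1.toList).toNat :=
    hmin _ (by rw [pvMAt_of_word hw hpre]; rfl)
  omega
theorem pvRfind_eq_of {s : List Char} {wv : String × String} {p : Nat}
    (hw : wv ∈ pvWords) (hp : wv.1.toList <+: s.drop p)
    (hmax : ∀ q : Nat, (pvMAt s q).isSome → q ≤ p) :
    PySem.Chars.rfind s wv.1.toList = (p : Int) := by
  have hplt : p < s.length := pvMAt_isSome_of_lt (by rw [pvMAt_of_word hw hp]; rfl)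
  have hge : (p : Int) ≤ PySem.Chars.rfind s wv.1.toList := by
    rw [pvRfind_eq_go]
    exact pvRfind_go_ge s.length p (by omega) hp
  obtain ⟨h0, hpre⟩ := pvRfind_go_prefix (s := s) (sub := wv.1.toList) s.length
      (by rw [← pvRfind_eq_go]; omega)
  rw [← pvRfind_eq_go] at h0 hpre
  have hle : (PySem.Chars.rfind s wv.1.toList).toNat ≤ p :=
    hmax _ (by rw [pvMAt_of_word hw hpre]; rfl)
  omega




-- rfl reshaping of the ports
theorem pvProcess_eq (i : Int) (line : String) :
    process i line =
      (let s := line.toList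
       let dfin := pvDigitStrings.foldl (pvStep s)
         (pvLoopLast s.reverse 0 (s.length : Int) (pvLoopFirst s 0 PySem.Dict.empty))
       (match PySem.List.min? dfin.keys (fun k => k) with
        | some k => (dfin.get? k).getD ""
        | none => "",
        match PySem.List.max? dfin.keys (fun k => k) with
        | some k => (dfin.get? k).getD ""
        | none => "")) := rfl

theorem pvVals_eq (s : List Char) :
    (List.range s.length).foldl (fun acc p =>
      match s.drop p with
      | [] => acc
      | c :: _ =>
          if PySem.Chars.isdigit c then acc ++ [String.ofList [c]]
          else match pvMatchWord pvWords (s.drop p) with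
               | some v => acc ++ [v]
               | none => acc) []
    = (List.range s.length).filterMap (pvMAt s) := by
  have hbody : ∀ (acc : List String) (p : Nat), p ∈ List.range s.length →
      (match s.drop p with
       | [] => acc
       | c :: _ =>
           if PySem.Chars.isdigit c then acc ++ [String.ofList [c]]
           else match pvMatchWord pvWords (s.drop p) with
                | some v => acc ++ [v]
                | none => acc)
      = acc ++ (pvMAt s p).toList := by
    intro acc p hp
    have hlt : p < s.length := List.mem_range.mp hp
    rw [List.drop_eq_getElem_cons hlt]
    by_cases hd : PySem.Chars.isdigit s[p]
    · simp [pvMAt, hlt, hd]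
    · simp only [Bool.not_eq_true] at hd
      simp only [hd, Bool.false_eq_true, if_false]
      rw [← List.drop_eq_getElem_cons hlt]
      cases hm : pvMatchWord pvWords (s.drop p) <;> simp [pvMAt, hlt, hd, hm]
  rw [List.foldl_ext _ (fun acc p => acc ++ (pvMAt s p).toList) _ (fun a b hb => hbody a b hb)]
  rw [PySem.List.foldl_append_eq_flatMap]
  simp [List.filterMap_eq_flatMap_toList]

theorem pvProcess_alt_eq (i : Int) (line : String) :
    process_alt i line =
      (let F := (List.range line.toList.length).filterMap (pvMAt line.toList)
       ((F[0]?).getD "", (F.getLast?).getD "")) := by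
  simp only [process_alt]
  rw [pvVals_eq]

theorem pvMain (s : List Char) (hex : ∃ p : Nat, (pvMAt s p).isSome) :
    (let dfin := pvDigitStrings.foldl (pvStep s)
        (pvLoopLast s.reverse 0 (s.length : Int) (pvLoopFirst s 0 PySem.Dict.empty))
     ((match PySem.List.min? dfin.keys (fun k => k) with
       | some k => (dfin.get? k).getD ""
       | none => ""),
      (match PySem.List.max? dfin.keys (fun k => k) with
       | some k => (dfin.get? k).getD ""
       | none => "")))
    = (let F := (List.range s.length).filterMap (pvMAt s)
       ((F[0]?).getD "", (F.getLast?).getD "")) := by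
  -- first match position i1
  have hfs1 : ((List.range s.length).find? (fun p => (pvMAt s p).isSome)).isSome := by
    obtain ⟨q, hq⟩ := hex
    exact List.find?_isSome.mpr ⟨q, List.mem_range.mpr (pvMAt_isSome_of_lt hq), hq⟩
  obtain ⟨p0, h1⟩ := Option.isSome_iff_exists.mp hfs1
  obtain ⟨hP0, i1, hi1, heq1, hmin1⟩ := List.find?_eq_some_iff_getElem.mp h1
  rw [List.getElem_range] at heq1
  subst heq1
  have hp0min : ∀ q : Nat, (pvMAt s q).isSome → i1 ≤ q := by
    intro q hq
    by_contra hlt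
    have := hmin1 q (by omega)
    rw [List.getElem_range] at this
    simp [hq] at this
  have hp0lt : i1 < s.length := pvMAt_isSome_of_lt hP0
  -- last match position pl
  have hfs2 : (((List.range s.length).reverse).find? (fun p => (pvMAt s p).isSome)).isSome := by
    obtain ⟨q, hq⟩ := hex
    exact List.find?_isSome.mpr ⟨q, List.mem_reverse.mpr (List.mem_range.mpr (pvMAt_isSome_of_lt hq)), hq⟩
  obtain ⟨pl, h2⟩ := Option.isSome_iff_exists.mp hfs2
  obtain ⟨hPl, i2, hi2, heq2, hmin2⟩ := List.find?_eq_some_iff_getElem.mp h2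
  simp only [List.length_reverse, List.length_range] at hi2
  have heq2' : s.length - 1 - i2 = pl := by
    simp only [List.getElem_reverse, List.length_range, List.getElem_range] at heq2
    exact heq2
  have hplmax : ∀ q : Nat, (pvMAt s q).isSome → q ≤ pl := by
    intro q hq
    by_contra hgt
    have hqlt : q < s.length := pvMAt_isSome_of_lt hq
    have := hmin2 (s.length - 1 - q) (by omega)
    simp only [List.getElem_reverse, List.length_range, List.getElem_range] at this
    have hidx : s.length - 1 - (s.length - 1 - q) = q := by omega
    rw [hidx] at this
    simp [hq] at this
  have hpllt : pl < s.length := pvMAt_isSome_of_lt hPl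
  obtain ⟨v0, hv0⟩ := Option.isSome_iff_exists.mp hP0
  obtain ⟨vl, hvl⟩ := Option.isSome_iff_exists.mp hPl
  -- right-hand side
  have hhead : ((List.range s.length).filterMap (pvMAt s)).head? = some v0 := by
    rw [pvHead?_filterMap, h1]; exact hv0
  have hlast : ((List.range s.length).filterMap (pvMAt s)).getLast? = some vl := by
    rw [List.getLast?_eq_head?_reverse, ← List.filterMap_reverse, pvHead?_filterMap, h2]
    exact hvl
  -- A's dict
  have hinv : pvInv s (pvDigitStrings.foldl (pvStep s)
      (pvLoopLast s.reverse 0 (s.length : Int) (pvLoopFirst s 0 PySem.Dict.empty))) := by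
    refine pvFoldl_inv _ _ (fun w hw => hw) ?_
    refine pvLoopLast_inv _ _ _ ?_ ?_
    · refine pvLoopFirst_inv _ _ _ ?_ ?_
      · intro kv hkv; simp [PySem.Dict.empty] at hkv
      · intro j hj hjd
        exact ⟨j, by push_cast; ring, pvMAt_of_digit hj hjd⟩
    · intro j hj hjd
      have hjn : j < s.length := by simpa using hj
      refine ⟨s.length - 1 - j, by push_cast; omega, ?_⟩
      have hr : s.reverse[j]'hj = s[s.length - 1 - j]'(by omega) := by
        simp [List.getElem_reverse]
      rw [hr] at hjd ⊢
      exact pvMAt_of_digit (by omega) hjd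
  set dfin := pvDigitStrings.foldl (pvStep s)
      (pvLoopLast s.reverse 0 (s.length : Int) (pvLoopFirst s 0 PySem.Dict.empty)) with hdfin
  -- i1 is a key
  have hkey0 : ((i1 : Nat) : Int) ∈ dfin.keys := by
    obtain ⟨hlt0, hcase⟩ := pvMAt_some_cases hv0
    rcases hcase with ⟨hd, hveq⟩ | ⟨wv, hwv, hv2, hpre0⟩
    · have hidx : s.findIdx? PySem.Chars.isdigit = some i1 := by
        refine List.findIdx?_eq_some_iff_getElem.mpr ⟨hlt0, hd, ?_⟩
        intro j hj
        by_contra hjd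
        have := hp0min j (by rw [pvMAt_of_digit (by omega) hjd]; rfl)
        omega
      have hm1 := pvLoopFirst_mem s 0 PySem.Dict.empty i1 hidx
      rw [zero_add] at hm1
      exact pvFoldl_keys_mono _ _ (pvLoopLast_keys_mono _ _ _ hm1)
    · have hfeq := pvFind_eq_of hwv hpre0 hp0min
      obtain ⟨hwd, hwval⟩ := pvWords_proj wv hwv
      exact pvFoldl_mem _ hwd (pvStep_mem_find hfeq) _
  -- pl is a key
  have hkeyl : ((pl : Nat) : Int) ∈ dfin.keys := by
    obtain ⟨hltl, hcase⟩ := pvMAt_some_cases hvl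
    rcases hcase with ⟨hd, hveq⟩ | ⟨wv, hwv, hv2, hprel⟩
    · have hidx : s.reverse.findIdx? PySem.Chars.isdigit = some (s.length - 1 - pl) := by
        refine List.findIdx?_eq_some_iff_getElem.mpr
          ⟨by simp only [List.length_reverse]; omega, ?_, ?_⟩
        · have hr : s.reverse[s.length - 1 - pl]'(by simp only [List.length_reverse]; omega)
              = s[pl]'hltl := by
            simp only [List.getElem_reverse, List.length_reverse]
            congr 1
            omega
          rw [hr]; exact hd
        · intro j hj
          by_contra hjd
          have hjlen : j < s.length := by
            have := hj.trans_le (by omega : s.length - 1 - pl ≤ s.length)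
            omega
          have hr : s.reverse[j]'(by simp only [List.length_reverse]; omega)
              = s[s.length - 1 - j]'(by omega) := by
            simp only [List.getElem_reverse, List.length_reverse]
          rw [hr] at hjd
          have := hplmax (s.length - 1 - j) (by rw [pvMAt_of_digit (by omega) hjd]; rfl)
          omega
      have hm2 := pvLoopLast_mem (n := (s.length : Int)) s.reverse 0
        (pvLoopFirst s 0 PySem.Dict.empty) _ hidx
      have hcast : (s.length : Int) - 1 - (0 + ((s.length - 1 - pl : Nat) : Int))
          = ((pl : Nat) : Int) := by push_cast; omega
      rw [hcast] at hm2
      exact pvFoldl_keys_mono _ _ hm2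
    · have hfeq := pvRfind_eq_of hwv hprel hplmax
      obtain ⟨hwd, hwval⟩ := pvWords_proj wv hwv
      exact pvFoldl_mem _ hwd (pvStep_mem_rfind hfeq) _
  -- all keys are match positions
  have hsound : ∀ k ∈ dfin.keys, ∃ p : Nat, k = (p : Int) ∧ (pvMAt s p).isSome := by
    intro k hk
    obtain ⟨kv, hkv, hk1⟩ := List.mem_map.mp hk
    obtain ⟨p, hp1, hp2⟩ := hinv kv hkv
    exact ⟨p, by rw [← hk1, hp1], by rw [hp2]; rfl⟩
  -- min / max of the keys
  have hmin : PySem.List.min? dfin.keys (fun k => k) = some ((i1 : Nat) : Int) := by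
    cases hm : PySem.List.min? dfin.keys (fun k => k) with
    | none =>
        rw [PySem.List.min?_eq_none_iff] at hm
        rw [hm] at hkey0; cases hkey0
    | some m =>
        obtain ⟨q, rfl, hq⟩ := hsound m (PySem.List.min?_mem hm)
        have ha := PySem.List.min?_isMin hm _ hkey0
        have hb := hp0min q hq
        have : q = i1 := by simp only at ha; omega
        rw [this]
  have hmax : PySem.List.max? dfin.keys (fun k => k) = some ((pl : Nat) : Int) := by
    cases hm : PySem.List.max? dfin.keys (fun k => k) with
    | none =>
        rw [PySem.List.max?_eq_none_iff] at hm
        rw [hm] at hkeyl; cases hkeyl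
    | some m =>
        obtain ⟨q, rfl, hq⟩ := hsound m (PySem.List.max?_mem hm)
        have ha := PySem.List.max?_isMax hm _ hkeyl
        have hb := hplmax q hq
        have : q = pl := by simp only at ha; omega
        rw [this]
  -- lookups
  have hget0 : dfin.get? ((i1 : Nat) : Int) = some v0 := by
    have hc : dfin.contains ((i1 : Nat) : Int) = true :=
      (PySem.Dict.contains_iff_mem_keys _ _).mpr hkey0
    rw [PySem.Dict.contains_eq_isSome_get?] at hc
    obtain ⟨u, hu⟩ := Option.isSome_iff_exists.mp hc
    obtain ⟨p, hp1, hp2⟩ := hinv _ (PySem.Dict.mem_items_of_get?_eq_some _ hu)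
    simp only at hp1 hp2
    have hpi : p = i1 := by exact_mod_cast hp1.symm
    rw [hpi] at hp2
    have huv : u = v0 := by
      have := hp2.symm.trans hv0
      injection this
    rw [hu, huv]
  have hgetl : dfin.get? ((pl : Nat) : Int) = some vl := by
    have hc : dfin.contains ((pl : Nat) : Int) = true :=
      (PySem.Dict.contains_iff_mem_keys _ _).mpr hkeyl
    rw [PySem.Dict.contains_eq_isSome_get?] at hc
    obtain ⟨u, hu⟩ := Option.isSome_iff_exists.mp hc
    obtain ⟨p, hp1, hp2⟩ := hinv _ (PySem.Dict.mem_items_of_get?_eq_some _ hu)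
    simp only at hp1 hp2
    have hpi : p = pl := by exact_mod_cast hp1.symm
    rw [hpi] at hp2
    have huv : u = vl := by
      have := hp2.symm.trans hvl
      injection this
    rw [hu, huv]
  simp only [← hdfin, hmin, hmax, hget0, hgetl, ← List.head?_eq_getElem?, hhead, hlast]

theorem process_spec' (i : Int) (line : String) (hpre : Pre_process i line) :
    process i line = process_alt i line := by
  have hex : ∃ p : Nat, (pvMAt line.toList p).isSome := by
    rw [Pre_process, Bool.or_eq_true] at hpre
    rcases hpre with hdig | hword
    · obtain ⟨c, hc, hcd⟩ := List.any_eq_true.mp hdig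
      obtain ⟨q, hq, rfl⟩ := List.mem_iff_getElem.mp hc
      exact ⟨q, by rw [pvMAt_of_digit hq hcd]; rfl⟩
    · obtain ⟨w, hw, hin⟩ := List.any_eq_true.mp hword
      obtain ⟨u, t, hut⟩ := (PySem.Chars.isIn_iff_infix _ _).mp hin
      have hpref : w.toList <+: line.toList.drop u.length := by
        have hdp : line.toList.drop u.length = w.toList ++ t := by
          rw [← hut, List.append_assoc, List.drop_left]
        exact ⟨t, hdp.symm⟩
      exact ⟨u.length, by rw [pvMAt_of_word (pvDigit_mem_words w hw) hpref]; rfl⟩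
  rw [pvProcess_eq, pvProcess_alt_eq]
  exact pvMain line.toList hex


-- ===== VERDICT (by name: the statement is the Claim_ definition above) =====
theorem process_spec : Claim_equal_process := by
  intro i line _ hpre
  unfold Spec_process
  exact process_spec' i line hpre
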